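-- pv_equiv track=rewrite | github.com/sixiyxy/DNAStorage | backend/script/step3_simulation_utils_parallel.py | error_density
-- ===== SOURCE A (Python) =====
-- def error_density(dnas):
--     dic={}
--     total=0
--     for dna in dnas:
--         for re in dna['re']:
--             n=len(re[1])
--             dic[n]=dic.get(n,0)+re[0]
--             total+=re[0]
--     # for i in dic:
--     #         dic[i] = dic[i] / total
--     dic = sorted(dic.items(), key=lambda e: e[0])
--     return dic
-- ===== SOURCE B (Python) =====
-- def error_density(dnas):
--     # Sort-then-group instead of dict aggregation: flatten all (length, count)
--     # pairs, sort them by length, then collapse equal-length runs back-to-front.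
--     pairs = sorted(((len(re[1]), re[0]) for dna in dnas for re in dna['re']),
--                    key=lambda p: p[0])
--     out = []
--     for n, c in reversed(pairs):
--         if out and out[0][0] == n:
--             out[0] = (n, c + out[0][1])
--         else:
--             out = [(n, c)] + out
--     return out
-- ===== Notes on version B (the rewrite author's own statement) =====
-- stated objective: alternative
-- what changed: Replaces the dict-keyed hash aggregation (and its dead `total` accumulator) with a sort-first pass: flatten all (length, count) pairs, sort by length, then collapse equal-length runs into summed tuples.
import Mathlib
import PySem

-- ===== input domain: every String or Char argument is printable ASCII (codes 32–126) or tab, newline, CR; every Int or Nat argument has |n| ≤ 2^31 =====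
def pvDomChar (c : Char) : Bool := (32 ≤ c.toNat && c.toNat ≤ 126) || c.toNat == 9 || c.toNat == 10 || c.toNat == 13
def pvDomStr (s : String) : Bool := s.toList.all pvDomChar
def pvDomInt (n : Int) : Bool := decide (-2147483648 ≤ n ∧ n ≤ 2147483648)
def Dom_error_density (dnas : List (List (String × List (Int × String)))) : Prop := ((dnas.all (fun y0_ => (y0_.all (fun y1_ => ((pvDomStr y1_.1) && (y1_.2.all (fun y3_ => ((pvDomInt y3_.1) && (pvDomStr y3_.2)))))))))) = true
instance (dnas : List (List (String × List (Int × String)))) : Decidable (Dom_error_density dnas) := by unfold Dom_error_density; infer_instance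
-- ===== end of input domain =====

-- B replaces A's dict aggregation by a sort-then-collapse pass (alternative algorithm, same results).
-- ===== PORT A =====
-- A: dict keyed by len(re[1]) accumulating re[0] (plus a dead `total` accumulator), then sorted items.
def error_density (dnas : List (List (String × List (Int × String)))) : List (Int × Int) :=
  PySem.List.sorted
    (dnas.foldl (fun st dna =>
        (((PySem.Dict.mk dna).get? "re").getD []).foldl
          (fun st re =>
            (st.1.insert (PySem.Str.len re.2) (st.1.getD (PySem.Str.len re.2) 0 + re.1),
             st.2 + re.1)) st)
      ((PySem.Dict.empty : PySem.Dict Int Int), (0 : Int))).1.items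
    (fun e => e.1) false

-- ===== PORT B =====
-- B: flatten all (length, count) pairs, sort by length, collapse runs back-to-front.
def error_density_alt (dnas : List (List (String × List (Int × String)))) : List (Int × Int) :=
  (PySem.List.sorted
      (dnas.flatMap (fun dna =>
        (((PySem.Dict.mk dna).get? "re").getD []).map (fun re => (PySem.Str.len re.2, re.1))))
      (fun p => p.1) false).reverse.foldl (fun out p =>
      match out with
      | (m, d) :: t => if m == p.1 then (p.1, p.2 + d) :: t else (p.1, p.2) :: (m, d) :: t
      | [] => [(p.1, p.2)]) []

-- ===== PRECONDITION & SPEC =====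
-- Pre_ excludes exactly the inputs where some dna lacks the key "re", on which A (and B) raise KeyError.
def Pre_error_density (dnas : List (List (String × List (Int × String)))) : Prop :=
  (dnas.all (fun dna => (PySem.Dict.mk dna).contains "re")) = true
instance (dnas : List (List (String × List (Int × String)))) : Decidable (Pre_error_density dnas) := by unfold Pre_error_density; infer_instance
def pvWitness_error_density : (List (List (String × List (Int × String)))) :=
  [[("re", [(2, "ab"), (1, "abc"), (3, "xy")])], [("re", [(5, "ab")])], [("re", [])]]
def Spec_error_density (dnas : List (List (String × List (Int × String)))) (out : List (Int × Int)) : Prop := out = error_density_alt dnas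
instance (dnas : List (List (String × List (Int × String)))) (out : List (Int × Int)) : Decidable (Spec_error_density dnas out) := by unfold Spec_error_density; infer_instance

-- ===== CLAIM (what is proved, stated in full; the proofs are below) =====
def Claim_equal_error_density : Prop := ∀ (dnas : List (List (String × List (Int × String)))), Dom_error_density dnas → Pre_error_density dnas → Spec_error_density dnas (error_density dnas)

-- ===== LEMMAS AND PROOFS =====

-- the flat list of (length, count) pairs both ports effectively aggregate
def edPairs (dnas : List (List (String × List (Int × String)))) : List (Int × Int) :=
  dnas.flatMap (fun dna =>
    (((PySem.Dict.mk dna).get? "re").getD []).map (fun re => (PySem.Str.len re.2, re.1)))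

-- A's dict-update step on the flat pair list
def edStep (d : PySem.Dict Int Int) (p : Int × Int) : PySem.Dict Int Int :=
  d.insert p.1 (d.getD p.1 0 + p.2)

-- total count carried at key k
def edSum (l : List (Int × Int)) (k : Int) : Int :=
  ((l.filter (fun p => p.1 == k)).map Prod.snd).sum

theorem edSum_cons (p : Int × Int) (l : List (Int × Int)) (k : Int) :
    edSum (p :: l) k = (if p.1 = k then p.2 else 0) + edSum l k := by
  simp [edSum, List.filter_cons]
  split <;> simp_all

theorem edSum_of_not_mem (l : List (Int × Int)) (k : Int) (h : k ∉ l.map Prod.fst) :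
    edSum l k = 0 := by
  have : l.filter (fun p => p.1 == k) = [] := by
    apply List.filter_eq_nil_iff.2
    intro p hp
    simp only [beq_iff_eq]
    intro hk
    exact h (by simpa [hk] using List.mem_map_of_mem (f := Prod.fst) hp)
  simp [edSum, this]

theorem edSum_perm {l l' : List (Int × Int)} (h : l.Perm l') (k : Int) :
    edSum l k = edSum l' k :=
  ((h.filter _).map _).sum_eq

theorem getD_foldl_edStep (l : List (Int × Int)) (d : PySem.Dict Int Int) (k : Int) :
    (l.foldl edStep d).getD k 0 = d.getD k 0 + edSum l k := by
  induction l generalizing d with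
  | nil => simp [edSum]
  | cons p t ih =>
    rw [List.foldl_cons, ih, edSum_cons]
    have hins : (edStep d p).getD k 0
        = if k = p.1 then d.getD p.1 0 + p.2 else d.getD k 0 := by
      simp [edStep, PySem.Dict.getD_insert]
    rw [hins]
    by_cases h1 : k = p.1
    · rw [if_pos h1, if_pos h1.symm, h1]
      ring
    · rw [if_neg h1, if_neg (fun he => h1 he.symm)]
      ring

theorem mem_keys_foldl_edStep (l : List (Int × Int)) (d : PySem.Dict Int Int) (k : Int) :
    k ∈ (l.foldl edStep d).keys ↔ k ∈ d.keys ∨ k ∈ l.map Prod.fst := by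
  induction l generalizing d with
  | nil => simp
  | cons p t ih =>
    rw [List.foldl_cons, ih]
    simp [edStep, PySem.Dict.mem_keys_insert]
    tauto

theorem nodup_keys_foldl_edStep (l : List (Int × Int)) :
    (l.foldl edStep PySem.Dict.empty).keys.Nodup := by
  have := PySem.Dict.nodup_keys_foldl_insert_key l Prod.fst
    (fun d x => d.getD x.1 0 + x.2) PySem.Dict.empty (by simp)
  simpa [edStep] using this

-- A's port computes sorted items of the edStep-fold over the flat pairs
theorem inner_fold_fst (l : List (Int × String)) (d : PySem.Dict Int Int) (t : Int) :
    (l.foldl (fun st re =>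
        (st.1.insert (PySem.Str.len re.2) (st.1.getD (PySem.Str.len re.2) 0 + re.1),
         st.2 + re.1)) (d, t)).1
      = (l.map (fun re => (PySem.Str.len re.2, re.1))).foldl edStep d := by
  induction l generalizing d t with
  | nil => rfl
  | cons re rest ih => simpa [edStep] using ih _ _

theorem outer_fold_fst (dnas : List (List (String × List (Int × String))))
    (d : PySem.Dict Int Int) (t : Int) :
    (dnas.foldl (fun st dna =>
        (((PySem.Dict.mk dna).get? "re").getD []).foldl
          (fun st re =>
            (st.1.insert (PySem.Str.len re.2) (st.1.getD (PySem.Str.len re.2) 0 + re.1),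
             st.2 + re.1)) st) (d, t)).1
      = (edPairs dnas).foldl edStep d := by
  induction dnas generalizing d t with
  | nil => simp [edPairs]
  | cons dna rest ih =>
    rw [List.foldl_cons]
    set s := (((PySem.Dict.mk dna).get? "re").getD []).foldl
      (fun st re =>
        (st.1.insert (PySem.Str.len re.2) (st.1.getD (PySem.Str.len re.2) 0 + re.1),
         st.2 + re.1)) (d, t) with hs
    have hfst : s.1 = ((((PySem.Dict.mk dna).get? "re").getD []).map
        (fun re => (PySem.Str.len re.2, re.1))).foldl edStep d := by
      rw [hs]; exact inner_fold_fst _ _ _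
    calc (rest.foldl (fun st dna =>
            (((PySem.Dict.mk dna).get? "re").getD []).foldl
              (fun st re =>
                (st.1.insert (PySem.Str.len re.2) (st.1.getD (PySem.Str.len re.2) 0 + re.1),
                 st.2 + re.1)) st) s).1
        = (edPairs rest).foldl edStep s.1 := ih s.1 s.2
      _ = (edPairs (dna :: rest)).foldl edStep d := by
          rw [hfst]
          simp [edPairs, List.foldl_append]

-- B's collapse step
def edCollapseStep (p : Int × Int) (out : List (Int × Int)) : List (Int × Int) :=
  match out with
  | (m, d) :: t => if m == p.1 then (p.1, p.2 + d) :: t else (p.1, p.2) :: (m, d) :: t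
  | [] => [(p.1, p.2)]

theorem collapse_facts (S : List (Int × Int)) (h : S.Pairwise (fun a b => a.1 ≤ b.1)) :
    (S.foldr edCollapseStep []).Pairwise (fun a b => a.1 < b.1)
    ∧ (∀ k, k ∈ (S.foldr edCollapseStep []).map Prod.fst ↔ k ∈ S.map Prod.fst)
    ∧ (∀ p ∈ S.foldr edCollapseStep [], p.2 = edSum S p.1) := by
  induction S with
  | nil => simp
  | cons p t ih =>
    obtain ⟨hle, ht⟩ := List.pairwise_cons.1 h
    obtain ⟨ia, ib, ic⟩ := ih ht
    rw [List.foldr_cons]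
    rcases hr : t.foldr edCollapseStep [] with _ | ⟨⟨m, d⟩, t''⟩
    · -- collapse t = [] → t = []
      have htnil : t = [] := by
        cases t with
        | nil => rfl
        | cons q t' =>
          exfalso
          have := (ib q.1).2 (by simp)
          rw [hr] at this; simp at this
      subst htnil
      simp [edCollapseStep, edSum]
    · rw [hr] at ia ib ic
      have hm_mem : m ∈ t.map Prod.fst := (ib m).1 (by simp)
      have hheadlt : ∀ q ∈ t'', m < q.1 := by
        intro q hq
        exact (List.pairwise_cons.1 ia).1 q hq
      have hm_min : ∀ k ∈ t.map Prod.fst, m ≤ k := by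
        intro k hk
        have hmem : k ∈ ((m, d) :: t'').map Prod.fst := (ib k).2 hk
        rw [List.map_cons] at hmem
        rcases List.mem_cons.1 hmem with h1 | h1
        · omega
        · obtain ⟨q, hq, hqk⟩ := List.mem_map.1 h1
          have := hheadlt q hq
          omega
      have hnm : p.1 ≤ m := by
        obtain ⟨q, hq, hqm⟩ := List.mem_map.1 hm_mem
        have := hle q hq
        omega
      by_cases hcase : m = p.1
      · have hstep : edCollapseStep p ((m, d) :: t'') = (m, p.2 + d) :: t'' := by
          simp [edCollapseStep, hcase]
        rw [hstep]
        refine ⟨?_, ?_, ?_⟩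
        · refine List.pairwise_cons.2 ⟨?_, (List.pairwise_cons.1 ia).2⟩
          intro q hq
          exact hheadlt q hq
        · intro k
          rw [List.map_cons, List.map_cons]
          constructor
          · intro hk
            rcases List.mem_cons.1 hk with h1 | h1
            · exact List.mem_cons.2 (Or.inl (h1.trans hcase))
            · have : k ∈ t.map Prod.fst := (ib k).1 (by
                rw [List.map_cons]; exact List.mem_cons.2 (Or.inr h1))
              exact List.mem_cons.2 (Or.inr this)
          · intro hk
            rcases List.mem_cons.1 hk with h1 | h1
            · exact List.mem_cons.2 (Or.inl (h1.trans hcase.symm))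
            · have : k ∈ ((m, d) :: t'').map Prod.fst := (ib k).2 h1
              rw [List.map_cons] at this
              exact this
        · intro q hq
          rcases List.mem_cons.1 hq with rfl | hq'
          · have hd : d = edSum t m := ic (m, d) (List.mem_cons_self)
            rw [edSum_cons, if_pos hcase.symm]
            simp [hd]
          · have hq2 : q.2 = edSum t q.1 := ic q (List.mem_cons_of_mem _ hq')
            have hne : m < q.1 := hheadlt q hq'
            rw [edSum_cons, if_neg (by omega)]
            omega
      · -- m ≠ p.1; then p.1 does not occur among t's keys
        have hnotin : p.1 ∉ t.map Prod.fst := by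
          intro hmem
          exact hcase (le_antisymm (hm_min _ hmem) hnm)
        have hlt : ∀ k ∈ ((m, d) :: t'').map Prod.fst, p.1 < k := by
          intro k hk
          have hkt : k ∈ t.map Prod.fst := (ib k).1 hk
          obtain ⟨q, hq, hqk⟩ := List.mem_map.1 hkt
          have h2 := hle q hq
          have h3 : k ≠ p.1 := fun he => hnotin (he ▸ hkt)
          omega
        have hstep : edCollapseStep p ((m, d) :: t'') = (p.1, p.2) :: (m, d) :: t'' := by
          simp only [edCollapseStep]
          rw [if_neg (by simpa using hcase)]
        rw [hstep]
        refine ⟨?_, ?_, ?_⟩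
        · refine List.pairwise_cons.2 ⟨?_, ia⟩
          intro q hq
          exact hlt q.1 (List.mem_map_of_mem hq)
        · intro k
          rw [List.map_cons, List.map_cons, List.map_cons]
          constructor
          · intro hk
            rcases List.mem_cons.1 hk with h1 | h1
            · exact List.mem_cons.2 (Or.inl h1)
            · have : k ∈ t.map Prod.fst := (ib k).1 (by rw [List.map_cons]; exact h1)
              exact List.mem_cons.2 (Or.inr this)
          · intro hk
            rcases List.mem_cons.1 hk with h1 | h1
            · exact List.mem_cons.2 (Or.inl h1)
            · have : k ∈ ((m, d) :: t'').map Prod.fst := (ib k).2 h1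
              rw [List.map_cons] at this
              exact List.mem_cons.2 (Or.inr this)
        · intro q hq
          rcases List.mem_cons.1 hq with rfl | hq'
          · rw [edSum_cons, if_pos rfl, edSum_of_not_mem t _ hnotin]
            simp
          · have hq2 : q.2 = edSum t q.1 := ic q hq'
            have : p.1 < q.1 := hlt q.1 (List.mem_map_of_mem hq')
            rw [edSum_cons, if_neg (by omega)]
            omega

def edD (dnas : List (List (String × List (Int × String)))) : PySem.Dict Int Int :=
  (edPairs dnas).foldl edStep PySem.Dict.empty

def edR (dnas : List (List (String × List (Int × String)))) : List (Int × Int) :=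
  (PySem.List.sorted (edPairs dnas) (fun p => p.1) false).foldr edCollapseStep []

theorem error_density_eq (dnas : List (List (String × List (Int × String)))) :
    error_density dnas = error_density_alt dnas := by
  have hSP : (PySem.List.sorted (edPairs dnas) (fun p => p.1) false).Perm (edPairs dnas) :=
    PySem.List.sorted_perm _ _ _
  have hSle : (PySem.List.sorted (edPairs dnas) (fun p => p.1) false).Pairwise
      (fun a b => a.1 ≤ b.1) := PySem.List.sorted_pairwise _ _
  obtain ⟨ra, rb, rc⟩ := collapse_facts _ hSle
  have hnodup : (edD dnas).keys.Nodup := nodup_keys_foldl_edStep _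
  have hA : error_density dnas = PySem.List.sorted (edD dnas).items (fun e => e.1) false := by
    unfold error_density edD
    rw [outer_fold_fst dnas PySem.Dict.empty 0]
  have hB : error_density_alt dnas = edR dnas := by
    unfold error_density_alt edR edPairs
    rw [List.foldl_reverse]
    rfl
  have hitems : (edD dnas).items = (edD dnas).keys.map (fun k => (k, edSum (edPairs dnas) k)) := by
    rw [PySem.Dict.items_eq_map_keys (edD dnas) hnodup 0]
    apply List.map_congr_left
    intro k _
    rw [edD, getD_foldl_edStep]
    simp
  have hRmap : edR dnas = ((edR dnas).map Prod.fst).map (fun k => (k, edSum (edPairs dnas) k)) := by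
    rw [List.map_map]
    conv_lhs => rw [(List.map_id (edR dnas)).symm]
    apply List.map_congr_left
    intro p hp
    have h1 := rc p hp
    have hps : edSum (PySem.List.sorted (edPairs dnas) (fun p => p.1) false) p.1
        = edSum (edPairs dnas) p.1 := edSum_perm hSP _
    simp only [id_eq, Function.comp_apply]
    exact Prod.ext rfl (h1.trans hps)
  have hRnodupkeys : ((edR dnas).map Prod.fst).Nodup :=
    (List.pairwise_map.2 ra).imp ne_of_lt
  have hmemD : ∀ k, k ∈ (edD dnas).keys ↔ k ∈ (edPairs dnas).map Prod.fst := by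
    intro k
    rw [edD, mem_keys_foldl_edStep]
    simp
  have hkeysperm : ((edR dnas).map Prod.fst).Perm (edD dnas).keys := by
    rw [List.perm_ext_iff_of_nodup hRnodupkeys hnodup]
    intro k
    rw [hmemD, edR, rb]
    exact (hSP.map Prod.fst).mem_iff
  have hperm : (edR dnas).Perm (edD dnas).items := by
    rw [hitems]
    conv_lhs => rw [hRmap]
    exact hkeysperm.map _
  have hsorted : PySem.List.sorted (edD dnas).items (fun e => e.1) false = edR dnas :=
    PySem.List.sorted_eq_of_perm_of_pairwise_lt _ _ _ hperm ra
  rw [hA, hB, hsorted]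

-- ===== VERDICT (by name: the statement is the Claim_ definition above) =====
theorem error_density_spec : Claim_equal_error_density := by
  intro dnas _ _
  unfold Spec_error_density
  exact error_density_eq dnas
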